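-- pv_equiv track=rewrite | github.com/vitor-ozols/Scrapy-Google-Search | mail_search/mail_search/spiders/ms.py | black_list_chars
-- ===== SOURCE A (Python) =====
-- def black_list_chars(str_to_check):
--
--     bl_chars = ['\\', '/', '%', '&', '#', '*', "(", ")", "<", ">",
--                 ',', '"', "'", ";", "?", "!", 'bootstrap', "=", "https",
--                 '[', ']']
--
--     check = True
--     for bl in bl_chars:
--         if bl in str_to_check:
--             check = False
--             break
--     return check
-- ===== SOURCE B (Python) =====
-- def black_list_chars(str_to_check):
--     # single pass over the string with a set of forbidden characters,
--     # plus two substring checks for the multi-character items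
--     bad = set('\\/%&#*()<>,"\';?!=[]')
--     for c in str_to_check:
--         if c in bad:
--             return False
--     return 'bootstrap' not in str_to_check and 'https' not in str_to_check
-- ===== Notes on version B (the rewrite author's own statement) =====
-- stated objective: alternative
-- what changed: Replaces 21 separate substring scans of the input (one per blacklist item) by a single character-by-character pass against a set of forbidden characters, plus two substring checks for the only multi-character items ('bootstrap', 'https').
import Mathlib
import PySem

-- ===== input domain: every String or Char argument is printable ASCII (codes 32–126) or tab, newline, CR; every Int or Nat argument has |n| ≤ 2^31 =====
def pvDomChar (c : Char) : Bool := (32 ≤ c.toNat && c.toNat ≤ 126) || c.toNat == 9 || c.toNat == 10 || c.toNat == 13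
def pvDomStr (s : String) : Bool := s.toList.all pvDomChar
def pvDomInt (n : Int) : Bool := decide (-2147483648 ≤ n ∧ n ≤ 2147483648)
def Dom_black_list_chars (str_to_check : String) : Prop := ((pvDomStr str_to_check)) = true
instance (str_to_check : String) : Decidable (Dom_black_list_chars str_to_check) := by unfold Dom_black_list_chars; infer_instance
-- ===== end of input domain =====

-- B replaces A's 21 separate substring scans by one character-by-character pass over the
-- string against a set of forbidden characters plus two substring checks for the
-- multi-character items (an alternative traversal; not claimed faster).



-- ===== PORT A =====
-- the loop 'for bl in bl_chars: if bl in str_to_check: check = False; break'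
def blacklistLoopA : List String → String → Bool
  | [], _ => true
  | bl :: rest, s => if PySem.Str.isIn bl s then false else blacklistLoopA rest s

def black_list_chars (str_to_check : String) : Bool :=
  blacklistLoopA ["\\", "/", "%", "&", "#", "*", "(", ")", "<", ">", ",", "\"", "\'", ";", "?", "!", "bootstrap", "=", "https", "[", "]"] str_to_check

-- ===== PORT B =====
-- bad = set('...')
def badCharSet : PySem.Set Char := PySem.Set.ofList ("\\/%&#*()<>,\"';?!=[]" : String).toList

-- 'for c in str_to_check: if c in bad: return False' then the final return
def blacklistLoopB : List Char → String → Bool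
  | [], s => !(PySem.Str.isIn "bootstrap" s) && !(PySem.Str.isIn "https" s)
  | c :: rest, s => if PySem.Set.contains badCharSet c then false else blacklistLoopB rest s

def black_list_chars_alt (str_to_check : String) : Bool :=
  blacklistLoopB str_to_check.toList str_to_check

-- ===== PRECONDITION & SPEC =====
def Spec_black_list_chars (str_to_check : String) (out : Bool) : Prop := out = black_list_chars_alt str_to_check
instance (str_to_check : String) (out : Bool) : Decidable (Spec_black_list_chars str_to_check out) := by unfold Spec_black_list_chars; infer_instance

-- ===== CLAIM (what is proved, stated in full; the proofs are below) =====
def Claim_equal_black_list_chars : Prop := ∀ (str_to_check : String), Dom_black_list_chars str_to_check → Spec_black_list_chars str_to_check (black_list_chars str_to_check)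

-- ===== LEMMAS AND PROOFS =====

lemma blacklistLoopA_eq (l : List String) (s : String) :
    blacklistLoopA l s = !(l.any (fun bl => PySem.Str.isIn bl s)) := by
  induction l with
  | nil => rfl
  | cons b rest ih =>
    simp only [blacklistLoopA, List.any_cons, ih]
    cases h : PySem.Str.isIn b s <;> simp

lemma blacklistLoopB_eq (l : List Char) (s : String) :
    blacklistLoopB l s =
      !(l.any (fun c => PySem.Set.contains badCharSet c)
        || PySem.Str.isIn "bootstrap" s || PySem.Str.isIn "https" s) := by
  induction l with
  | nil => simp [blacklistLoopB]
  | cons c rest ih =>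
    simp only [blacklistLoopB, List.any_cons, ih]
    cases h : PySem.Set.contains badCharSet c <;> simp

lemma char_isIn (bl : String) (c : Char) (h : bl.toList = [c]) (s : String) :
    PySem.Str.isIn bl s = s.toList.contains c := by
  rw [Bool.eq_iff_iff]
  simp [PySem.Chars.isIn_iff_infix, h, List.singleton_infix_iff]

lemma contains_badCharSet (c : Char) :
    PySem.Set.contains badCharSet c = (['\\', '/', '%', '&', '#', '*', '(', ')', '<', '>', ',', '\"', '\'', ';', '?', '!', '=', '[', ']'] : List Char).contains c := by
  rw [Bool.eq_iff_iff]
  rw [PySem.Set.contains_iff, badCharSet]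
  rw [show ("\\/%&#*()<>,\"';?!=[]" : String).toList = ['\\', '/', '%', '&', '#', '*', '(', ')', '<', '>', ',', '\"', '\'', ';', '?', '!', '=', '[', ']'] from by decide]
  simp [PySem.Set.mem_ofList]

lemma any_mem_swap (l L : List Char) :
    l.any (fun c => L.contains c) = L.any (fun c => l.contains c) := by
  rw [Bool.eq_iff_iff]
  simp only [List.any_eq_true, List.contains_iff_mem]
  exact ⟨fun ⟨c, h1, h2⟩ => ⟨c, h2, h1⟩, fun ⟨c, h1, h2⟩ => ⟨c, h2, h1⟩⟩

-- ===== VERDICT (by name: the statement is the Claim_ definition above) =====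
theorem black_list_chars_spec : Claim_equal_black_list_chars := by
  intro str_to_check _
  unfold Spec_black_list_chars black_list_chars black_list_chars_alt
  rw [blacklistLoopA_eq, blacklistLoopB_eq]
  simp only [List.any_cons, List.any_nil]
  rw [show PySem.Str.isIn "\\" str_to_check = str_to_check.toList.contains '\\' from char_isIn _ _ (by decide) _]
  rw [show PySem.Str.isIn "/" str_to_check = str_to_check.toList.contains '/' from char_isIn _ _ (by decide) _]
  rw [show PySem.Str.isIn "%" str_to_check = str_to_check.toList.contains '%' from char_isIn _ _ (by decide) _]
  rw [show PySem.Str.isIn "&" str_to_check = str_to_check.toList.contains '&' from char_isIn _ _ (by decide) _]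
  rw [show PySem.Str.isIn "#" str_to_check = str_to_check.toList.contains '#' from char_isIn _ _ (by decide) _]
  rw [show PySem.Str.isIn "*" str_to_check = str_to_check.toList.contains '*' from char_isIn _ _ (by decide) _]
  rw [show PySem.Str.isIn "(" str_to_check = str_to_check.toList.contains '(' from char_isIn _ _ (by decide) _]
  rw [show PySem.Str.isIn ")" str_to_check = str_to_check.toList.contains ')' from char_isIn _ _ (by decide) _]
  rw [show PySem.Str.isIn "<" str_to_check = str_to_check.toList.contains '<' from char_isIn _ _ (by decide) _]
  rw [show PySem.Str.isIn ">" str_to_check = str_to_check.toList.contains '>' from char_isIn _ _ (by decide) _]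
  rw [show PySem.Str.isIn "," str_to_check = str_to_check.toList.contains ',' from char_isIn _ _ (by decide) _]
  rw [show PySem.Str.isIn "\"" str_to_check = str_to_check.toList.contains '\"' from char_isIn _ _ (by decide) _]
  rw [show PySem.Str.isIn "\'" str_to_check = str_to_check.toList.contains '\'' from char_isIn _ _ (by decide) _]
  rw [show PySem.Str.isIn ";" str_to_check = str_to_check.toList.contains ';' from char_isIn _ _ (by decide) _]
  rw [show PySem.Str.isIn "?" str_to_check = str_to_check.toList.contains '?' from char_isIn _ _ (by decide) _]
  rw [show PySem.Str.isIn "!" str_to_check = str_to_check.toList.contains '!' from char_isIn _ _ (by decide) _]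
  rw [show PySem.Str.isIn "=" str_to_check = str_to_check.toList.contains '=' from char_isIn _ _ (by decide) _]
  rw [show PySem.Str.isIn "[" str_to_check = str_to_check.toList.contains '[' from char_isIn _ _ (by decide) _]
  rw [show PySem.Str.isIn "]" str_to_check = str_to_check.toList.contains ']' from char_isIn _ _ (by decide) _]
  rw [show (fun c => PySem.Set.contains badCharSet c) = (fun c => (['\\', '/', '%', '&', '#', '*', '(', ')', '<', '>', ',', '\"', '\'', ';', '?', '!', '=', '[', ']'] : List Char).contains c) from funext contains_badCharSet]
  rw [any_mem_swap]
  simp only [List.any_cons, List.any_nil]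
  rw [Bool.eq_iff_iff]
  simp only [Bool.not_eq_eq_eq_not, Bool.not_true, Bool.or_eq_false_iff]
  constructor <;> intro h <;> tauto
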